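-- pv_equiv track=rewrite | github.com/dascardonaca/TCC | pythonpasdfrog.py | selc
-- ===== SOURCE A (Python) =====
-- def wcc2(x, delim):
-- 	c=0
-- 	z=[]
-- 	z.append('')
-- 	for i in range (len(x)):
-- 		if x[i]!=delim:
-- 			z[c]=z[c]+x[i]
-- 		else:
-- 			c=c+1
-- 			z.append('')
-- 	return z
--
-- def sortw(x, delim):
-- 	x=x[:]
-- 	z=[]
--
-- 	for i in range (len(x)):
-- 		z.append(wcc2(x[i],delim))
-- 	x=[]
-- 	for i in range (len(z)):
-- 		for j in range(len(z[i])):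
-- 			x.append(z[i][j])
--
-- 	return(sorted(x))
--
-- def uniqc(x, delim):
--     z=sortw(x,delim)
--     x=[]
--     for i in range(len(z)):
--     	if z[i] not in x:
--     		x.append(z[i])
--
--     return(x)
--
-- def selc(x, n, delim):
-- 	z=sortw(x,delim)
-- 	x=uniqc(z, delim)
-- 	y=[]
-- 	for i in range(len(x)):
-- 		c=0
-- 		for j in range(len(z)):
-- 			if x[i] == z[j]:
-- 				c=c+1
-- 		if c==n:
-- 			y.append(x[i])
-- 	return(y)
-- ===== SOURCE B (Python) =====
-- from itertools import groupby
--
--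
-- def _split(s, delim):
--     # exact replica of wcc2's per-character split: splits only when delim is a
--     # single character; otherwise (empty or multi-char delim) no split happens
--     if len(delim) == 1:
--         parts = []
--         cur = []
--         for ch in s:
--             if ch == delim:
--                 parts.append(''.join(cur))
--                 cur = []
--             else:
--                 cur.append(ch)
--         parts.append(''.join(cur))
--         return parts
--     return [s]
--
--
-- def selc(x, n, delim):
--     words = sorted(w for s in x for w in _split(s, delim))
--     return [w for w, g in groupby(words) if sum(1 for _ in g) == n]
-- ===== Notes on version B (the rewrite author's own statement) =====
-- stated objective: faster
-- what changed: A re-splits and re-sorts its own word list, dedups with a quadratic 'not in' scan and counts each distinct word with a full inner pass; B splits each string once, sorts the flattened word list once, and emits words whose maximal run of equal adjacent elements has length n in a single groupby pass.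
import Mathlib
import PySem

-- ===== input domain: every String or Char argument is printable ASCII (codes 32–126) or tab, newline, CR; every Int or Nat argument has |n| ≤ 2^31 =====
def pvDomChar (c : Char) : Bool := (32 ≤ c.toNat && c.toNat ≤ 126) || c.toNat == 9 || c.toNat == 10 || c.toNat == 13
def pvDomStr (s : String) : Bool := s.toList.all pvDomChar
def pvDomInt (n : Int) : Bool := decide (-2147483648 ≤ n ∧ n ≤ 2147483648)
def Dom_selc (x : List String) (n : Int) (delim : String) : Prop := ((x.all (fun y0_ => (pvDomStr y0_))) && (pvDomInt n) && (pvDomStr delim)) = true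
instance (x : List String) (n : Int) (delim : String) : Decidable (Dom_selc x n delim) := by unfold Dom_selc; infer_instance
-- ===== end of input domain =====

-- B replaces A's quadratic re-split + per-word counting scans by one sort and a single
-- grouping pass over runs of equal adjacent words (same return value on every input).

-- ===== PORT A =====
-- wcc2: c=0; z=['']; for ch in x: if ch != delim: z[c] += ch else: c += 1; z.append('')
-- z[c] read/write ported with getD/set: c < z.length always holds here, so they are exact.
def wcc2A (x : List Char) (delim : List Char) : List (List Char) :=
  (x.foldl
    (fun (st : Nat × List (List Char)) ch =>
      if [ch] ≠ delim then (st.1, st.2.set st.1 ((st.2.getD st.1 []) ++ [ch]))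
      else (st.1 + 1, st.2 ++ [[]]))
    (0, [[]])).2

def sortwA (x : List (List Char)) (delim : List Char) : List (List Char) :=
  let z := x.foldl (fun acc s => acc ++ [wcc2A s delim]) []
  let x2 := z.foldl (fun acc zi => zi.foldl (fun acc2 w => acc2 ++ [w]) acc) []
  @PySem.List.sorted (List Char) (List Char)
    List.instLinearOrder.toLT LinearOrder.toDecidableLT x2 (fun w => w) false

def uniqcA (x : List (List Char)) (delim : List Char) : List (List Char) :=
  let z := sortwA x delim
  z.foldl (fun acc w => if w ∈ acc then acc else acc ++ [w]) []

def selcA (x : List (List Char)) (n : Int) (delim : List Char) : List (List Char) :=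
  let z := sortwA x delim
  let u := uniqcA z delim
  u.foldl
    (fun y w =>
      let c := z.foldl (fun c w' => if w = w' then c + 1 else c) (0 : Int)
      if c = n then y ++ [w] else y)
    []

def selc (x : List String) (n : Int) (delim : String) : List String :=
  (selcA (x.map String.toList) n delim.toList).map String.ofList

-- ===== PORT B =====
-- _split: single-character delim → per-character split keeping empty fields; else no split.
def splitB (delim : List Char) (s : List Char) : List (List Char) :=
  if delim.length = 1 then
    let st := s.foldl
      (fun (pc : List (List Char) × List Char) ch =>
        if [ch] = delim then (pc.1 ++ [pc.2], []) else (pc.1, pc.2 ++ [ch]))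
      ([], [])
    st.1 ++ [st.2]
  else [s]

-- itertools.groupby on the sorted word list: one pass over maximal runs of equal words.
def groupB (n : Int) : List (List Char) → List (List Char)
  | [] => []
  | a :: t =>
    let run := t.takeWhile (fun b => b == a)
    let rest := t.dropWhile (fun b => b == a)
    (if ((run.length + 1 : Nat) : Int) = n then [a] else []) ++ groupB n rest
  termination_by l => l.length
  decreasing_by
    have := List.length_dropWhile_le (p := fun b => b == a) (l := t)
    simp only [List.length_cons]; omega

def selc_alt (x : List String) (n : Int) (delim : String) : List String :=
  let words := @PySem.List.sorted (List Char) (List Char)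
    List.instLinearOrder.toLT LinearOrder.toDecidableLT
    ((x.map String.toList).flatMap (splitB delim.toList)) (fun w => w) false
  (groupB n words).map String.ofList

-- ===== PRECONDITION & SPEC =====
def Spec_selc (x : List String) (n : Int) (delim : String) (out : List String) : Prop := out = selc_alt x n delim
instance (x : List String) (n : Int) (delim : String) (out : List String) : Decidable (Spec_selc x n delim out) := by unfold Spec_selc; infer_instance

-- ===== CLAIM (what is proved, stated in full; the proofs are below) =====
def Claim_equal_selc : Prop := ∀ (x : List String) (n : Int) (delim : String), Dom_selc x n delim → Spec_selc x n delim (selc x n delim)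

-- ===== LEMMAS AND PROOFS =====

-- A's per-character split equals B's.
theorem wcc2A_eq_splitB (d s : List Char) : wcc2A s d = splitB d s := by
  by_cases hd : d.length = 1
  · obtain ⟨dc, rfl⟩ : ∃ dc, d = [dc] := by
      match d, hd with
      | [c], _ => exact ⟨c, rfl⟩
    have inv : ∀ (s : List Char) (parts : List (List Char)) (cur : List Char),
        s.foldl (fun (st : Nat × List (List Char)) ch =>
            if [ch] ≠ [dc] then (st.1, st.2.set st.1 ((st.2.getD st.1 []) ++ [ch]))
            else (st.1 + 1, st.2 ++ [[]])) (parts.length, parts ++ [cur]) =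
          ((s.foldl (fun (pc : List (List Char) × List Char) ch =>
              if [ch] = [dc] then (pc.1 ++ [pc.2], []) else (pc.1, pc.2 ++ [ch])) (parts, cur)).1.length,
           (s.foldl (fun (pc : List (List Char) × List Char) ch =>
              if [ch] = [dc] then (pc.1 ++ [pc.2], []) else (pc.1, pc.2 ++ [ch])) (parts, cur)).1 ++
             [(s.foldl (fun (pc : List (List Char) × List Char) ch =>
              if [ch] = [dc] then (pc.1 ++ [pc.2], []) else (pc.1, pc.2 ++ [ch])) (parts, cur)).2]) := by
      intro s
      induction s with
      | nil => intro parts cur; rfl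
      | cons ch t ih =>
        intro parts cur
        by_cases h : ch = dc
        · have htrue : ([ch] = [dc]) := by simp [h]
          simp only [List.foldl_cons, if_neg (show ¬ [ch] ≠ [dc] by simpa using h),
            if_pos htrue]
          have := ih (parts ++ [cur]) []
          simpa [List.append_assoc] using this
        · have hne : ¬ ([ch] = [dc]) := by simpa using h
          simp only [List.foldl_cons, ne_eq, hne, not_false_eq_true, if_pos]
          have hg : (parts ++ [cur]).getD parts.length [] = cur := by simp [List.getD]
          have hs : (parts ++ [cur]).set parts.length (cur ++ [ch]) = parts ++ [cur ++ [ch]] := by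
            rw [List.set_append]; simp
          rw [hg, hs]
          exact ih parts (cur ++ [ch])
    have h0 := congrArg Prod.snd (inv s [] [])
    unfold wcc2A splitB
    rw [if_pos hd]
    simpa using h0
  · have inv2 : ∀ (s cur : List Char),
        s.foldl (fun (st : Nat × List (List Char)) ch =>
            if [ch] ≠ d then (st.1, st.2.set st.1 ((st.2.getD st.1 []) ++ [ch]))
            else (st.1 + 1, st.2 ++ [[]])) (0, [cur]) = (0, [cur ++ s]) := by
      intro s
      induction s with
      | nil => intro cur; simp
      | cons ch t ih =>
        intro cur
        have hne : [ch] ≠ d := by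
          intro hc; apply hd; rw [← hc]; rfl
        simp only [List.foldl_cons, ne_eq, hne, not_false_eq_true, if_pos]
        have : ([cur] : List (List Char)).set 0 (([cur].getD 0 []) ++ [ch]) = [cur ++ [ch]] := by
          simp [List.getD]
        rw [this, ih (cur ++ [ch])]
        simp
    have h0 := congrArg Prod.snd (inv2 s [])
    unfold wcc2A splitB
    rw [if_neg hd]
    simpa using h0

-- fields of a single-character split never contain the delimiter
theorem splitB_mem_not_mem (dc : Char) (s w : List Char) (hw : w ∈ splitB [dc] s) :
    dc ∉ w := by
  have inv : ∀ (s : List Char) (parts : List (List Char)) (cur : List Char),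
      (∀ p ∈ parts, dc ∉ p) → dc ∉ cur →
      (∀ p ∈ (s.foldl (fun (pc : List (List Char) × List Char) ch =>
          if [ch] = [dc] then (pc.1 ++ [pc.2], []) else (pc.1, pc.2 ++ [ch])) (parts, cur)).1, dc ∉ p) ∧
        dc ∉ (s.foldl (fun (pc : List (List Char) × List Char) ch =>
          if [ch] = [dc] then (pc.1 ++ [pc.2], []) else (pc.1, pc.2 ++ [ch])) (parts, cur)).2 := by
    intro s
    induction s with
    | nil => intro parts cur hp hc; exact ⟨hp, hc⟩
    | cons ch t ih =>
      intro parts cur hp hc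
      by_cases h : ch = dc
      · simp only [List.foldl_cons, if_pos (show ([ch] = [dc]) by simp [h])]
        refine ih (parts ++ [cur]) [] ?_ (by simp)
        intro p hpm
        rcases List.mem_append.mp hpm with h1 | h1
        · exact hp p h1
        · simp at h1; subst h1; exact hc
      · simp only [List.foldl_cons, if_neg (show ¬([ch] = [dc]) by simpa using h)]
        refine ih parts (cur ++ [ch]) hp ?_
        intro hmem
        rcases List.mem_append.mp hmem with h1 | h1
        · exact hc h1
        · simp at h1; exact h h1.symm
  have h2 := inv s [] [] (by simp) (by simp)
  simp only [List.cons.injEq, and_true] at h2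
  unfold splitB at hw
  rw [if_pos (by simp : ([dc] : List Char).length = 1)] at hw
  simp only [List.cons.injEq, and_true] at hw
  rcases List.mem_append.mp hw with h1 | h1
  · exact h2.1 w h1
  · simp at h1; subst h1; exact h2.2

-- re-splitting a field is the identity
theorem splitB_field (d s w : List Char) (hw : w ∈ splitB d s) : splitB d w = [w] := by
  by_cases hd : d.length = 1
  · obtain ⟨dc, rfl⟩ : ∃ dc, d = [dc] := by
      match d, hd with
      | [c], _ => exact ⟨c, rfl⟩
    have hnot : dc ∉ w := splitB_mem_not_mem dc s w hw
    have inv3 : ∀ (u : List Char), dc ∉ u → ∀ (parts : List (List Char)) (cur : List Char),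
        u.foldl (fun (pc : List (List Char) × List Char) ch =>
          if [ch] = [dc] then (pc.1 ++ [pc.2], []) else (pc.1, pc.2 ++ [ch])) (parts, cur) =
        (parts, cur ++ u) := by
      intro u
      induction u with
      | nil => intro _ parts cur; simp
      | cons ch t ih =>
        intro hu parts cur
        have h1 : ch ≠ dc := by intro hc; exact hu (by simp [hc])
        simp only [List.foldl_cons, if_neg (show ¬([ch] = [dc]) by simpa using h1)]
        rw [ih (fun hm => hu (List.mem_cons_of_mem _ hm)) parts (cur ++ [ch])]
        simp
    unfold splitB
    rw [if_pos (by simp : ([dc] : List Char).length = 1), inv3 w hnot [] []]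
    simp
  · unfold splitB at hw ⊢
    rw [if_neg hd] at hw ⊢

-- sortwA is sorted-flatMap of the split
theorem sortwA_eq (x : List (List Char)) (d : List Char) :
    sortwA x d = @PySem.List.sorted (List Char) (List Char)
      List.instLinearOrder.toLT LinearOrder.toDecidableLT (x.flatMap (splitB d)) (fun w => w) false := by
  have h1 : x.foldl (fun acc s => acc ++ [wcc2A s d]) [] = x.map (fun s => wcc2A s d) := by
    simpa using PySem.List.foldl_append_singleton_eq_map (l := x) (f := fun s => wcc2A s d) (acc := [])
  have h2 : (fun (acc : List (List Char)) (zi : List (List Char)) =>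
      zi.foldl (fun acc2 w => acc2 ++ [w]) acc) = fun acc zi => acc ++ zi := by
    funext acc zi
    exact PySem.List.foldl_append_singleton_eq_self (l := zi) (acc := acc)
  have h3 := PySem.List.foldl_append_eq_flatten (xs := x.map (fun s => wcc2A s d)) (acc := ([] : List (List Char)))
  have h4 : x.map (fun s => wcc2A s d) = x.map (splitB d) := by
    apply List.map_congr_left
    intro a _
    exact wcc2A_eq_splitB d a
  simp only [sortwA]
  rw [h1, h2, h3, h4]
  simp [List.flatMap_def]

-- applying sortwA to an already sorted list of fields is the identity
theorem sortwA_fields (x : List (List Char)) (d : List Char) :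
    sortwA (sortwA x d) d = sortwA x d := by
  rw [sortwA_eq x d, sortwA_eq]
  set W := @PySem.List.sorted (List Char) (List Char)
    List.instLinearOrder.toLT LinearOrder.toDecidableLT (x.flatMap (splitB d)) (fun w => w) false with hW
  have hfield : ∀ w ∈ W, splitB d w = [w] := by
    intro w hw
    have : w ∈ x.flatMap (splitB d) := (@PySem.List.mem_sorted (List Char) (List Char) _ LinearOrder.toDecidableLT _ _ _ _).mp hw
    rcases List.mem_flatMap.mp this with ⟨s, _, hws⟩
    exact splitB_field d s w hws
  have hmap : W.flatMap (splitB d) = W := by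
    have he : W.flatMap (splitB d) = W.flatMap (fun w => [w]) := by
      rw [List.flatMap_def, List.flatMap_def, List.map_congr_left hfield]
    rw [he]
    simp
  rw [hmap, hW]
  exact PySem.List.sorted_eq_self_of_pairwise _ _
    (PySem.List.sorted_pairwise (x.flatMap (splitB d)) (fun w => w))

-- A's dedup loop is PySem.List.dedup
theorem uniq_loop_eq_dedup (z : List (List Char)) :
    z.foldl (fun acc w => if w ∈ acc then acc else acc ++ [w]) [] = PySem.List.dedup z := by
  rw [PySem.List.dedup_eq_ofList, PySem.Set.ofList_eq_foldl]
  congr 1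
  funext acc w
  by_cases h : w ∈ acc
  · simp [PySem.Set.add, h]
  · simp [PySem.Set.add, h]

-- the heart: on a pairwise-≤ list, filtering the deduped words by total count = n
-- is exactly the run-grouping pass

-- first element surviving dropWhile fails the predicate
theorem dropWhile_first_not (p : List Char → Bool) (l : List (List Char))
    (r0 : List Char) (r' : List (List Char)) (h : l.dropWhile p = r0 :: r') : p r0 = false := by
  induction l with
  | nil => simp at h
  | cons x xs ih =>
    by_cases hx : p x
    · rw [List.dropWhile_cons_of_pos hx] at h
      exact ih h
    · rw [List.dropWhile_cons_of_neg hx] at h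
      injection h with h1 _
      subst h1
      simpa using hx

-- a run of elements equal to the head adds nothing to the accumulator [a]
theorem foldl_add_run (a : List Char) (run : List (List Char)) (h : ∀ b ∈ run, b = a) :
    run.foldl PySem.Set.add [a] = [a] := by
  induction run with
  | nil => rfl
  | cons b t ih =>
    have hb : b = a := h b (List.mem_cons_self)
    subst hb
    have : PySem.Set.add [b] b = [b] := by simp [PySem.Set.add]
    rw [List.foldl_cons, this]
    exact ih (fun c hc => h c (List.mem_cons_of_mem _ hc))

-- an element absent from the rest of the input stays at the front of the accumulator
theorem foldl_add_cons (a : List Char) (t : List (List Char)) (ha : a ∉ t) :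
    ∀ acc : List (List Char), a ∉ acc →
      t.foldl PySem.Set.add (a :: acc) = a :: t.foldl PySem.Set.add acc := by
  induction t with
  | nil => intro acc _; rfl
  | cons x t ih =>
    intro acc hacc
    have hxa : x ≠ a := fun he => ha (by simp [he])
    have hat : a ∉ t := fun hm => ha (List.mem_cons_of_mem _ hm)
    rw [List.foldl_cons, List.foldl_cons]
    by_cases hc : x ∈ acc
    · have e1 : PySem.Set.add (a :: acc) x = a :: acc := by
        simp [PySem.Set.add, hc]
      have e2 : PySem.Set.add acc x = acc := by simp [PySem.Set.add, hc]
      rw [e1, e2]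
      exact ih hat acc hacc
    · have e1 : PySem.Set.add (a :: acc) x = a :: (acc ++ [x]) := by
        simp [PySem.Set.add, hc, hxa]
      have e2 : PySem.Set.add acc x = acc ++ [x] := by simp [PySem.Set.add, hc]
      rw [e1, e2]
      refine ih hat (acc ++ [x]) ?_
      intro hm
      rcases List.mem_append.mp hm with h | h
      · exact hacc h
      · simp at h; exact hxa h.symm

theorem dedup_filter_eq_groupB (n : Int) (z : List (List Char)) (hz : z.Pairwise (· ≤ ·)) :
    (PySem.List.dedup z).filter (fun w => decide ((z.count w : Int) = n)) = groupB n z := by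
  suffices H : ∀ (L : Nat) (z : List (List Char)), z.length ≤ L → z.Pairwise (· ≤ ·) →
      (PySem.List.dedup z).filter (fun w => decide ((z.count w : Int) = n)) = groupB n z by
    exact H z.length z le_rfl hz
  intro L
  induction L with
  | zero =>
    intro z hlen _
    have : z = [] := List.eq_nil_of_length_eq_zero (Nat.le_zero.mp hlen)
    subst this
    rw [groupB.eq_def]
    rfl
  | succ L ihL =>
    intro z hlen hz
    match z with
    | [] => rw [groupB.eq_def]; rfl
    | a :: t =>
      set run := t.takeWhile (fun b => b == a) with hrun_def
      set rest := t.dropWhile (fun b => b == a) with hrest_def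
      have ht : run ++ rest = t := List.takeWhile_append_dropWhile
      have hlenrest : rest.length ≤ L := by
        have h1 := List.length_dropWhile_le (p := fun b => b == a) (l := t)
        rw [← hrest_def] at h1
        have h2 : (a :: t).length ≤ L + 1 := hlen
        simp only [List.length_cons] at h2
        omega
      rcases List.pairwise_cons.mp hz with ⟨ha, hpt⟩
      have hprest : rest.Pairwise (· ≤ ·) :=
        List.Pairwise.sublist (List.dropWhile_sublist _) hpt
      have hrun_eq : ∀ b ∈ run, b = a := by
        intro b hb
        have := List.mem_takeWhile_imp hb
        simpa using this
      have hanotin : a ∉ rest := by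
        intro hmem
        cases hr : rest with
        | nil => rw [hr] at hmem; simp at hmem
        | cons r0 r' =>
          have hdw : t.dropWhile (fun b => b == a) = r0 :: r' := by
            rw [← hrest_def]; exact hr
          have hr0ne : r0 ≠ a := by
            have := dropWhile_first_not (fun b => b == a) t r0 r' hdw
            simpa using this
          have hr0t : r0 ∈ t := (List.dropWhile_sublist _).subset (by rw [← hrest_def, hr]; simp)
          rw [hr] at hmem
          rcases List.mem_cons.mp hmem with h | h
          · exact hr0ne h.symm
          · have h1 : r0 ≤ a := (List.pairwise_cons.mp (hr ▸ hprest)).1 a h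
            have h2 : a ≤ r0 := ha r0 hr0t
            exact hr0ne (le_antisymm h1 h2)
      have hcrun : run.count a = run.length := by
        rw [List.count_eq_length]
        intro b hb
        rw [hrun_eq b hb]
      have hcrest : rest.count a = 0 := List.count_eq_zero.mpr hanotin
      have hcount_a : (a :: t).count a = run.length + 1 := by
        rw [← ht, List.count_cons_self, List.count_append, hcrun, hcrest]
      have hcount_w : ∀ w, w ∈ rest → (a :: t).count w = rest.count w := by
        intro w hw
        have hwa : w ≠ a := fun he => hanotin (he ▸ hw)
        have hwrun : w ∉ run := fun hm => hwa (hrun_eq w hm)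
        rw [← ht, List.count_cons_of_ne (Ne.symm hwa), List.count_append,
          List.count_eq_zero.mpr hwrun, Nat.zero_add]
      have hadd0 : PySem.Set.add ([] : List (List Char)) a = [a] := by simp [PySem.Set.add]
      have hded : PySem.List.dedup (a :: t) = a :: PySem.List.dedup rest := by
        rw [PySem.List.dedup_eq_ofList, PySem.List.dedup_eq_ofList,
          PySem.Set.ofList_eq_foldl, PySem.Set.ofList_eq_foldl]
        rw [List.foldl_cons, hadd0, ← ht, List.foldl_append, foldl_add_run a run hrun_eq]
        exact foldl_add_cons a rest hanotin [] (by simp)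
      rw [hded, List.filter_cons]
      have hfiltereq : (PySem.List.dedup rest).filter
            (fun w => decide (((a :: t).count w : Int) = n)) =
          (PySem.List.dedup rest).filter (fun w => decide ((rest.count w : Int) = n)) := by
        apply List.filter_congr
        intro w hw
        have hwrest : w ∈ rest := by
          have := hw
          rw [PySem.List.dedup_eq_ofList] at this
          simpa [PySem.Set.mem_ofList] using this
        rw [hcount_w w hwrest]
      rw [hfiltereq, ihL rest hlenrest hprest]
      have hgb : groupB n (a :: t) =
          (if ((t.takeWhile (fun b => b == a)).length + 1 : Nat) = (n : Int) then [a] else []) ++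
            groupB n (t.dropWhile (fun b => b == a)) := by
        rw [groupB]
      rw [hgb, ← hrun_def, ← hrest_def, hcount_a]
      by_cases hc : ((run.length + 1 : Nat) : Int) = n
      · rw [if_pos (by simpa using hc), if_pos hc]
        rfl
      · rw [if_neg (by simpa using hc), if_neg hc, List.nil_append]

-- ===== VERDICT (by name: the statement is the Claim_ definition above) =====
theorem selc_spec : Claim_equal_selc := by
  intro x n delim _
  show selc x n delim = selc_alt x n delim
  unfold selc selc_alt
  congr 1
  simp only [selcA, uniqcA]
  rw [sortwA_fields, sortwA_eq]
  set X := x.map String.toList with hX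
  set d := delim.toList with hd
  set W := @PySem.List.sorted (List Char) (List Char)
    List.instLinearOrder.toLT LinearOrder.toDecidableLT (X.flatMap (splitB d)) (fun w => w) false with hW
  rw [uniq_loop_eq_dedup W]
  have hcnt : ∀ w : List Char,
      W.foldl (fun c w' => if w = w' then c + 1 else c) (0 : Int) = (W.count w : Int) := by
    intro w
    rw [PySem.List.foldl_ite_add_one]
    have hcp : W.countP (fun x => decide (w = x)) = W.count w := by
      apply List.countP_congr
      intro b _
      by_cases h : w = b
      · subst h; simp
      · have h' : ¬ b = w := fun e => h e.symm
        simp [h, h']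
    rw [hcp, zero_add]
  have hbody : (fun (y : List (List Char)) (w : List Char) =>
        if (W.foldl (fun c w' => if w = w' then c + 1 else c) (0 : Int)) = n then y ++ [w] else y) =
      fun y w => if ((W.count w : Int) = n) then y ++ [w] else y := by
    funext y w
    rw [hcnt w]
  rw [hbody, PySem.List.foldl_append_ite_eq_filter, List.nil_append]
  exact dedup_filter_eq_groupB n W
    (PySem.List.sorted_pairwise (X.flatMap (splitB d)) (fun w => w))
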